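-- pv_equiv track=rewrite | github.com/cadia-lvl/SLT2018 | processors/length_symbol_analysis.py | remove_late_length_symbols
-- ===== SOURCE A (Python) =====
-- def remove_late_length_symbols(phon_arr, vowel_set, length_symbol):
--     vowel_seen = False
--     for ind, phon in enumerate(phon_arr):
--         if phon in vowel_set:
--             if vowel_seen and length_symbol in phon:
--                 phon = phon.replace(length_symbol, '')
--                 phon_arr[ind] = phon
--             else:
--                 vowel_seen = True
--
--     new_transcr = ' '.join(phon_arr)
--     return new_transcr
-- ===== SOURCE B (Python) =====
-- def remove_late_length_symbols(phon_arr, vowel_set, length_symbol):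
--     # find the index of the first vowel (len(phon_arr) if there is none)
--     first = len(phon_arr)
--     for i, p in enumerate(phon_arr):
--         if p in vowel_set:
--             first = i
--             break
--     # strip the length symbol from every vowel after it, in place
--     phon_arr[first + 1:] = [p.replace(length_symbol, '') if p in vowel_set else p
--                             for p in phon_arr[first + 1:]]
--     return ' '.join(phon_arr)
-- ===== Notes on version B (the rewrite author's own statement) =====
-- stated objective: alternative
-- what changed: Replaces A's single flagged pass (boolean vowel_seen threaded through one loop) by a find-then-process decomposition: locate the index of the first vowel, then rewrite only the slice after it with a comprehension assigned back in place.
import Mathlib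
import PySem

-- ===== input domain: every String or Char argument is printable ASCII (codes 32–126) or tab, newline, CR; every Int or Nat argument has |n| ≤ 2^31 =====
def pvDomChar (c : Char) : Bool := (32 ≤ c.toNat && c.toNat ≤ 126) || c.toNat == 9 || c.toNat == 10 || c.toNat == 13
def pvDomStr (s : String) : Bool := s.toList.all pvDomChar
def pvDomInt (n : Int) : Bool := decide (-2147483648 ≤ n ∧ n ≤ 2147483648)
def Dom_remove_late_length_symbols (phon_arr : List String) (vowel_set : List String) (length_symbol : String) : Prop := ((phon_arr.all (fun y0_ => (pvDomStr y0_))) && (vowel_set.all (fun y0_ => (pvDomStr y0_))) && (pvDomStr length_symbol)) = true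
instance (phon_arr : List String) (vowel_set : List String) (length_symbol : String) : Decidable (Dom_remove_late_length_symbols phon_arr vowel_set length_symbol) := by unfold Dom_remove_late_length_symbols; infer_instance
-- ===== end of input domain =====

-- B replaces A's single flagged pass (a vowel_seen boolean threaded through one loop) by a
-- find-then-process decomposition: locate the first vowel, then rewrite the slice after it.
-- A mutates phon_arr in place; B performs the same mutation, and the equivalence proved here
-- is about the RETURN value.

-- ===== PORT A =====
-- the for-loop of A: state = (remaining list, vowel_seen); builds the updated list forward
def pvGoA (vs : List String) (ls : String) : List String → Bool → List String
  | [], _ => []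
  | phon :: rest, seen =>
    if vs.contains phon then
      if seen && PySem.Str.isIn ls phon then
        PySem.Str.replace phon ls "" :: pvGoA vs ls rest seen
      else
        phon :: pvGoA vs ls rest true
    else
      phon :: pvGoA vs ls rest seen

def remove_late_length_symbols (phon_arr : List String) (vowel_set : List String) (length_symbol : String) : String :=
  PySem.Str.join " " (pvGoA vowel_set length_symbol phon_arr false)

-- ===== PORT B =====
-- Source B's first loop: index of the first vowel, len(phon_arr) if none
def pvFirstVowel (vs : List String) : List String → Nat
  | [] => 0
  | p :: rest => if vs.contains p then 0 else pvFirstVowel vs rest + 1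

-- Source B's comprehension body
def pvClean (vs : List String) (ls : String) (p : String) : String :=
  if vs.contains p then PySem.Str.replace p ls "" else p

def remove_late_length_symbols_alt (phon_arr : List String) (vowel_set : List String) (length_symbol : String) : String :=
  let first := pvFirstVowel vowel_set phon_arr
  let tail := (PySem.List.slice phon_arr (some ((first + 1 : Nat) : Int)) none).map (pvClean vowel_set length_symbol)
  PySem.Str.join " " (PySem.List.slice phon_arr none (some ((first + 1 : Nat) : Int)) ++ tail)

-- ===== PRECONDITION & SPEC =====
def Spec_remove_late_length_symbols (phon_arr : List String) (vowel_set : List String) (length_symbol : String) (out : String) : Prop := out = remove_late_length_symbols_alt phon_arr vowel_set length_symbol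
instance (phon_arr : List String) (vowel_set : List String) (length_symbol : String) (out : String) : Decidable (Spec_remove_late_length_symbols phon_arr vowel_set length_symbol out) := by unfold Spec_remove_late_length_symbols; infer_instance

-- ===== CLAIM (what is proved, stated in full; the proofs are below) =====
def Claim_equal_remove_late_length_symbols : Prop := ∀ (phon_arr : List String) (vowel_set : List String) (length_symbol : String), Dom_remove_late_length_symbols phon_arr vowel_set length_symbol → Spec_remove_late_length_symbols phon_arr vowel_set length_symbol (remove_late_length_symbols phon_arr vowel_set length_symbol)

-- ===== LEMMAS AND PROOFS =====

-- replace.go without any occurrence of `old` copies its input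
theorem pv_go_nomatch (old new s : List Char) (hs : ¬ old <:+: s) :
    ∀ (fuel : Nat) (l acc : List Char), l <:+ s →
      PySem.Chars.replace.go old new fuel l acc = acc.reverse ++ l := by
  intro fuel
  induction fuel with
  | zero => intro l acc _; simp [PySem.Chars.replace.go]
  | succ n ih =>
    intro l acc hl
    cases l with
    | nil => simp [PySem.Chars.replace.go]
    | cons c t =>
      have hpre : old.isPrefixOf (c :: t) = false := by
        by_contra h
        exact hs (List.infix_iff_prefix_suffix.mpr
          ⟨c :: t, List.isPrefixOf_iff_prefix.mp (by simpa using h), hl⟩)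
      simp only [PySem.Chars.replace.go, hpre, Bool.false_eq_true, if_false]
      have := ih t (c :: acc) ((List.suffix_cons_iff.mpr (Or.inr (List.suffix_refl t))).trans hl)
      simp [this]

theorem pv_chars_replace_id (s old : List Char) (h : ¬ old <:+: s) :
    PySem.Chars.replace s old [] = s := by
  have hne : old.isEmpty = false := by
    cases old with
    | nil => exact absurd List.nil_infix h
    | cons a t => rfl
  simp only [PySem.Chars.replace, hne, Bool.false_eq_true, if_false]
  simpa using pv_go_nomatch old [] s h s.length s [] (List.suffix_refl s)

-- str.replace with a pattern that does not occur is the identity (also covers '' in Python-style: '' always occurs)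
theorem pv_replace_id (p ls : String) (h : PySem.Chars.isIn ls.toList p.toList = false) :
    PySem.Str.replace p ls "" = p := by
  have hinf : ¬ ls.toList <:+: p.toList := (PySem.Chars.isIn_eq_false_iff _ _).mp h
  have : (PySem.Str.replace p ls "").toList = p.toList := by
    rw [PySem.Str.toList_replace]
    simpa using pv_chars_replace_id p.toList ls.toList hinf
  exact String.toList_inj.mp this

-- once a vowel has been seen, A maps pvClean over the rest
theorem pv_goA_true (vs : List String) (ls : String) (l : List String) :
    pvGoA vs ls l true = l.map (pvClean vs ls) := by
  induction l with
  | nil => rfl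
  | cons p rest ih =>
    by_cases hv : p ∈ vs
    · by_cases hi : PySem.Chars.isIn ls.toList p.toList = true
      · simp [pvGoA, pvClean, hv, hi, ih]
      · have hr := pv_replace_id p ls (by simpa using hi)
        simp [pvGoA, pvClean, hv, hi, ih, hr]
    · simp [pvGoA, pvClean, hv, ih]

-- before any vowel, A keeps elements up to and including the first vowel, then maps pvClean
theorem pv_goA_false (vs : List String) (ls : String) (l : List String) :
    pvGoA vs ls l false =
      l.take (pvFirstVowel vs l + 1) ++ (l.drop (pvFirstVowel vs l + 1)).map (pvClean vs ls) := by
  induction l with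
  | nil => rfl
  | cons p rest ih =>
    by_cases hv : p ∈ vs
    · simp [pvGoA, pvFirstVowel, hv, pv_goA_true]
    · simp [pvGoA, pvFirstVowel, hv, ih]

-- ===== VERDICT (by name: the statement is the Claim_ definition above) =====
theorem remove_late_length_symbols_spec : Claim_equal_remove_late_length_symbols := by
  intro phon_arr vowel_set length_symbol _
  unfold Spec_remove_late_length_symbols remove_late_length_symbols remove_late_length_symbols_alt
  rw [pv_goA_false]
  simp only [PySem.List.slice_to_natCast, PySem.List.slice_from_natCast, List.map_drop]
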